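-- pv_equiv track=rewrite | github.com/Pierll/P52_Programmes_RSA | attaques/simmons_noris_attack.py | decomp2
-- ===== SOURCE A (Python) =====
-- import math
--
-- def decomp2(n):
--     d = n
--     b = []
--     r = []
--     while d > 0:
--         if d%2 != 0:
--             b.append(1)
--         else:
--             b.append(0)
--         d = math.floor(d / 2)
--     for i in range(len(b)-1, -1, -1):
--         if b[i]:
--              r.append(pow(2,i))
--     return r
-- ===== SOURCE B (Python) =====
-- def decomp2(n):
--     r = []
--     while n > 0:
--         p = 1 << (n.bit_length() - 1)
--         r.append(p)
--         n -= p
--     return r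
-- ===== Notes on version B (the rewrite author's own statement) =====
-- stated objective: alternative
-- what changed: B replaces A's build-a-0/1-bit-list-then-reread-it scheme by greedy value subtraction: repeatedly take the largest power of two not exceeding n (computed from bit_length), append it and subtract it, so no bit array and no per-index bit test exist.
import Mathlib
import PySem

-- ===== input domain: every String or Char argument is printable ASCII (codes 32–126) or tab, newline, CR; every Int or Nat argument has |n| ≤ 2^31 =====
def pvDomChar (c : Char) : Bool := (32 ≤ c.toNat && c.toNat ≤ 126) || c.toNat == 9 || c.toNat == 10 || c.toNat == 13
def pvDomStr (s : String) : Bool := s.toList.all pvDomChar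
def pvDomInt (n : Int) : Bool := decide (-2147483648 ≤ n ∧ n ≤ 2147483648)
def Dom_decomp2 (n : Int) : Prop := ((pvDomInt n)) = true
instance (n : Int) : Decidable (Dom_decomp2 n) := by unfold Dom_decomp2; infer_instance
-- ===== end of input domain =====

-- B replaces A's bit-list construction and reread by greedy subtraction of the
-- largest power of two ≤ n; objective: alternative (same asymptotic cost).

-- ===== PORT A =====
-- A's while-loop: append the 0/1 flag of d%2 != 0, then d = math.floor(d/2)
-- math.floor(d/2) equals floor division d//2 exactly for |d| ≤ 2^31 (floats exact below 2^53).
def pvBitsA (d : Int) : List Int :=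
  if _h : 0 < d then
    (if PySem.Int.mod d 2 ≠ 0 then (1 : Int) else 0) :: pvBitsA (PySem.Int.floordiv d 2)
  else []
termination_by d.toNat
decreasing_by
  rw [PySem.Int.floordiv_eq_ediv_of_pos (by omega)]
  omega

def decomp2 (n : Int) : List Int :=
  (PySem.List.pyRange (((pvBitsA n).length : Int) - 1) (-1) (-1)).foldl
    (fun r i => if PySem.List.pyGetD (pvBitsA n) i 0 ≠ 0 then r ++ [(2 : Int) ^ i.toNat] else r) []

-- ===== PORT B =====
-- greedy: while n is positive, append the largest power of two not exceeding n and subtract it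
def decomp2_alt (n : Int) : List Int :=
  if _h : 0 < n then
    ((1 : Int) <<< (PySem.Int.bitLength n - 1)) ::
      decomp2_alt (n - (1 : Int) <<< (PySem.Int.bitLength n - 1))
  else []
termination_by n.toNat
decreasing_by
  simp only [Int.shiftLeft_eq, one_mul]
  have h1 : (2:Nat)^(PySem.Int.bitLength n - 1) ≤ n.natAbs :=
    PySem.Int.two_pow_bitLength_le n (by omega)
  have h2 : (1:Nat) ≤ 2^(PySem.Int.bitLength n - 1) := Nat.one_le_two_pow
  have h3 : (((2:Nat)^(PySem.Int.bitLength n - 1) : Nat) : Int) = (2:Int)^(PySem.Int.bitLength n - 1) := by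
    push_cast; ring
  omega

-- ===== PRECONDITION & SPEC =====
def Spec_decomp2 (n : Int) (out : List Int) : Prop := out = decomp2_alt n
instance (n : Int) (out : List Int) : Decidable (Spec_decomp2 n out) := by unfold Spec_decomp2; infer_instance

-- ===== CLAIM (what is proved, stated in full; the proofs are below) =====
def Claim_equal_decomp2 : Prop := ∀ (n : Int), Dom_decomp2 n → Spec_decomp2 n (decomp2 n)

-- ===== LEMMAS AND PROOFS =====

-- canonical descending big-endian decomposition, parameterised by the scan bound
def pvG (m L : Nat) : List Int :=
  ((List.range L).reverse.filter (fun i => decide (m / 2^i % 2 = 1))).map (fun i => (2:Int)^i)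

theorem pvFloordiv_two_natCast (m : Nat) :
    PySem.Int.floordiv (m : Int) 2 = ((m / 2 : Nat) : Int) := by
  exact_mod_cast PySem.Int.floordiv_natCast m 2

theorem pvMod_two_natCast (m : Nat) :
    PySem.Int.mod (m : Int) 2 = ((m % 2 : Nat) : Int) := by
  exact_mod_cast PySem.Int.mod_natCast m 2

theorem pvBitsA_length (m : Nat) (h : 0 < m) :
    (pvBitsA (m : Int)).length = PySem.Int.bitLength (m : Int) := by
  induction m using Nat.strong_induction_on with
  | _ m ih =>
    rw [pvBitsA, PySem.Int.bitLength_natCast (m := m) h]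
    simp only [show (0:Int) < (m:Int) from by exact_mod_cast h, dif_pos, List.length_cons,
      pvFloordiv_two_natCast]
    by_cases h2 : 0 < m / 2
    · rw [ih (m / 2) (by omega) h2]
    · have : m / 2 = 0 := by omega
      rw [this]
      rw [pvBitsA]
      simp [PySem.Int.bitLength_zero]

theorem pvBitsA_getD (m : Nat) (h : 0 < m) (i : Nat) :
    (pvBitsA (m : Int)).getD i 0 = ((m / 2 ^ i % 2 : Nat) : Int) := by
  induction m using Nat.strong_induction_on generalizing i with
  | _ m ih =>
    rw [pvBitsA]
    simp only [show (0:Int) < (m:Int) from by exact_mod_cast h, dif_pos,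
      pvFloordiv_two_natCast, pvMod_two_natCast]
    cases i with
    | zero =>
      simp only [List.getD_cons_zero, pow_zero, Nat.div_one]
      rcases Nat.mod_two_eq_zero_or_one m with h2 | h2 <;> simp [h2]
    | succ i =>
      simp only [List.getD_cons_succ]
      have hdd : m / 2 / 2 ^ i = m / 2 ^ (i + 1) := by
        rw [Nat.div_div_eq_div_mul, pow_succ, mul_comm]
      by_cases h2 : 0 < m / 2
      · rw [ih (m / 2) (by omega) h2 i, hdd]
      · have hm1 : m / 2 = 0 := by omega
        have hm : m = 1 := by omega
        rw [hm1, pvBitsA]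
        simp only [show ¬ (0:Int) < ((0:Nat):Int) from by omega, dif_neg, not_false_iff,
          List.getD_nil]
        rw [hm, Nat.div_eq_of_lt (Nat.one_lt_two_pow_iff.mpr (by omega))]
        simp

theorem pvRangeDesc (L : Nat) :
    PySem.List.pyRange ((L:Int)-1) (-1) (-1) = (List.range L).reverse.map (Nat.cast : Nat → Int) := by
  induction L with
  | zero => rw [PySem.List.pyRange_neg_one_eq_nil (by omega)]; simp
  | succ L ih =>
    have h : ((L+1:Nat):Int) - 1 = (L:Int) := by push_cast; ring
    rw [h, PySem.List.pyRange_neg_one_cons (by omega), ih, List.range_succ]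
    simp

-- A's result equals the canonical descending scan up to bit_length
theorem pvA_eq (m : Nat) : decomp2 (m:Int) = pvG m (PySem.Int.bitLength (m:Int)) := by
  by_cases hm : 0 < m
  · unfold decomp2
    rw [pvBitsA_length m hm, pvRangeDesc, List.foldl_map, PySem.List.foldl_append_ite,
      List.nil_append]
    unfold pvG
    have hfil := List.filter_congr (l := (List.range (PySem.Int.bitLength (m:Int))).reverse)
      (p := fun a : Nat => decide (PySem.List.pyGetD (pvBitsA (m:Int)) (Nat.cast a) 0 ≠ 0))
      (q := fun i : Nat => decide (m / 2^i % 2 = 1)) ?_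
    · rw [hfil]
      apply List.map_congr_left
      intro i _
      simp
    · intro i _
      simp only [PySem.List.pyGetD_natCast]
      rw [pvBitsA_getD m hm i]
      rcases Nat.mod_two_eq_zero_or_one (m / 2 ^ i) with h2 | h2 <;> simp [h2]
  · have h0 : m = 0 := by omega
    subst h0
    unfold decomp2
    rw [pvBitsA]
    simp only [show ¬ (0:Int) < ((0:Nat):Int) from by omega, dif_neg, not_false_iff]
    rw [show ((([]: List Int).length : Int) - 1) = -1 from by simp,
      PySem.List.pyRange_neg_one_eq_nil (by omega)]
    simp [pvG, PySem.Int.bitLength_zero]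

-- bits at or above the bit length are zero, so the scan bound can shrink
theorem pvG_drop (m L' K : Nat) (h : m < 2^L') (hK : L' ≤ K) : pvG m K = pvG m L' := by
  induction K, hK using Nat.le_induction with
  | base => rfl
  | succ K hK ih =>
    have hz : m / 2^K = 0 :=
      Nat.div_eq_of_lt (lt_of_lt_of_le h (Nat.pow_le_pow_right (by omega) hK))
    unfold pvG
    rw [List.range_succ]
    simp only [List.reverse_append, List.reverse_singleton, List.singleton_append,
      List.filter_cons, hz]
    simpa [pvG] using ih

-- greedy step on the canonical form: strip the top bit
theorem pvG_step (m : Nat) (hm : 0 < m) :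
    pvG m (PySem.Int.bitLength (m:Int)) =
      (2:Int)^(PySem.Int.bitLength (m:Int) - 1) ::
        pvG (m - 2^(PySem.Int.bitLength (m:Int) - 1))
          (PySem.Int.bitLength ((m - 2^(PySem.Int.bitLength (m:Int) - 1) : Nat) : Int)) := by
  set L := PySem.Int.bitLength (m:Int) with hL
  have hub : m < 2^L := by
    have := PySem.Int.lt_two_pow_bitLength (m:Int); simpa [← hL] using this
  have hlb : 2^(L-1) ≤ m := by
    have := PySem.Int.two_pow_bitLength_le (m:Int) (by exact_mod_cast hm.ne')
    simpa [← hL] using this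
  have hL1 : 1 ≤ L := by
    by_contra h
    have : L = 0 := by omega
    rw [this] at hub; omega
  set k := L - 1 with hk
  set m' := m - 2^k with hm'
  have hLk : L = k + 1 := by omega
  have htop : m / 2^k = 1 := by
    apply Nat.div_eq_of_lt_le (by simpa using hlb)
    calc m < 2^L := hub
    _ = 2 * 2^k := by rw [hLk, pow_succ, mul_comm]
  -- low bits of m and m' agree
  have hbit : ∀ i, i < k → m / 2^i % 2 = m' / 2^i % 2 := by
    intro i hi
    have hsplit : m = m' + 2^(k-i) * 2^i := by
      rw [← pow_add]
      have : k - i + i = k := by omega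
      rw [this]; omega
    have hdiv : m / 2^i = m' / 2^i + 2^(k-i) := by
      rw [hsplit, Nat.add_mul_div_right _ _ (Nat.two_pow_pos i)]
    have heven : 2^(k-i) = 2 * 2^(k-i-1) := by
      rw [← pow_succ']
      congr 1; omega
    omega
  -- m' has no bits at or above k
  have hL' : PySem.Int.bitLength ((m':Nat):Int) ≤ k := by
    by_cases h0 : 0 < m'
    · have hub' : m' < 2^k := by
        have h2 : (2:Nat)^L = 2^k*2 := by rw [hLk, pow_succ]
        omega
      have := PySem.Int.two_pow_bitLength_le ((m':Nat):Int) (by exact_mod_cast h0.ne')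
      have hle : 2^(PySem.Int.bitLength ((m':Nat):Int) - 1) ≤ m' := by simpa using this
      have : 2^(PySem.Int.bitLength ((m':Nat):Int) - 1) < 2^k := lt_of_le_of_lt hle hub'
      have := (Nat.pow_lt_pow_iff_right (by omega : 1 < 2)).mp this
      omega
    · have : m' = 0 := by omega
      simp [this, PySem.Int.bitLength_zero]
  have hub' : m' < 2^(PySem.Int.bitLength ((m':Nat):Int)) := by
    have := PySem.Int.lt_two_pow_bitLength ((m':Nat):Int); simpa using this
  rw [pvG_drop m' _ k hub' hL' |>.symm] at *
  -- expand the top index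
  conv_lhs => rw [pvG, hLk, List.range_succ]
  simp only [List.reverse_append, List.reverse_singleton, List.singleton_append,
    List.filter_cons, htop]
  simp only [decide_true, if_pos, List.map_cons]
  congr 1
  · unfold pvG
    congr 1
    apply List.filter_congr
    intro i hi
    have hik : i < k := by simpa using hi
    rw [hbit i hik]

-- greedy step on B's port
theorem pvB_step (m : Nat) (hm : 0 < m) :
    decomp2_alt (m:Int) =
      (2:Int)^(PySem.Int.bitLength (m:Int) - 1) ::
        decomp2_alt ((m - 2^(PySem.Int.bitLength (m:Int) - 1) : Nat) : Int) := by
  rw [decomp2_alt]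
  have hpos : (0:Int) < (m:Int) := by exact_mod_cast hm
  have hlb : 2^(PySem.Int.bitLength (m:Int)-1) ≤ m := by
    have := PySem.Int.two_pow_bitLength_le (m:Int) (by exact_mod_cast hm.ne')
    simpa using this
  simp only [dif_pos hpos, Int.shiftLeft_eq, one_mul]
  congr 1
  push_cast [Nat.cast_sub hlb]
  ring_nf

theorem pvMain (m : Nat) : decomp2 (m:Int) = decomp2_alt (m:Int) := by
  induction m using Nat.strong_induction_on with
  | _ m ih =>
    by_cases hm : 0 < m
    · have hlb : 2^(PySem.Int.bitLength (m:Int)-1) ≤ m := by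
        have := PySem.Int.two_pow_bitLength_le (m:Int) (by exact_mod_cast hm.ne')
        simpa using this
      have h1 : (1:Nat) ≤ 2^(PySem.Int.bitLength (m:Int)-1) := Nat.one_le_two_pow
      rw [pvA_eq m, pvG_step m hm, pvB_step m hm]
      congr 1
      rw [← pvA_eq, ih _ (by omega)]
    · have h0 : m = 0 := by omega
      subst h0
      rw [pvA_eq 0, decomp2_alt]
      simp [pvG, PySem.Int.bitLength_zero]

-- ===== VERDICT (by name: the statement is the Claim_ definition above) =====
theorem decomp2_spec : Claim_equal_decomp2 := by
  intro n _
  unfold Spec_decomp2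
  by_cases hn : 0 < n
  · obtain ⟨m, hm⟩ : ∃ m : Nat, n = (m : Int) := ⟨n.toNat, by omega⟩
    subst hm
    exact pvMain m
  · rw [decomp2_alt]
    simp only [dif_neg hn]
    unfold decomp2
    rw [pvBitsA]
    simp only [dif_neg hn]
    rw [show ((([]: List Int).length : Int) - 1) = -1 from by simp,
      PySem.List.pyRange_neg_one_eq_nil (by omega)]
    rfl
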